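-- pv_equiv track=rewrite | github.com/Surya-prasad-S-H/diseases-prediction-using-python | diagonise.py | categorize_diseases
-- ===== SOURCE A (Python) =====
-- def categorize_diseases(data):
--     categories = {
--         'Respiratory System Diseases': {'Bronchial Asthma', 'Pneumonia', 'Tuberculosis', 'Common Cold'},
--         'Digestive System Diseases': {'GERD', 'Chronic Cholestasis', 'Peptic Ulcer Disease', 'Alcoholic Hepatitis',
--                                       'Hepatitis A', 'Hepatitis B', 'Hepatitis C', 'Hepatitis D', 'Hepatitis E'},
--         'Cardiovascular Diseases': {'Heart Attack', 'Hypertension'},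
--         'Endocrine System Diseases': {'Diabetes', 'Hyperthyroidism', 'Hypothyroidism', 'Hypoglycemia'},
--         'Musculoskeletal System Diseases': {'Osteoarthritis', 'Arthritis', 'Cervical Spondylosis'},
--         'Neurological Diseases': {'Paralysis (Brain Hemorrhage)', 'Migraine', 'Vertigo (Paroxysmal Positional Vertigo)'},
--         'Infectious Diseases': {'Fungal Infection', 'AIDS', 'Urinary Tract Infection', 'Malaria', 'Chicken Pox',
--                                 'Dengue', 'Typhoid'},
--         'Skin Diseases': {'Acne', 'Impetigo', 'Psoriasis'},
--         'Other Diseases': {'Varicose Veins', 'Allergy', 'Drug Reaction', 'Gastroenteritis'}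
--     }
--
--     categorized_diseases = {}
--     for disease, symptoms in data:
--         categorized = False
--         for category, diseases in categories.items():
--             if disease in diseases:
--                 categorized_diseases.setdefault(category, []).append((disease, symptoms))
--                 categorized = True
--                 break
--         if not categorized:
--             categorized_diseases.setdefault('Other Diseases', []).append((disease, symptoms))
--
--     return categorized_diseases
-- ===== SOURCE B (Python) =====
-- # Precomputed reverse table disease -> category; one pass, one lookup per item.
-- _LOOKUP = {
--     'Bronchial Asthma': 'Respiratory System Diseases',
--     'Pneumonia': 'Respiratory System Diseases',
--     'Tuberculosis': 'Respiratory System Diseases',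
--     'Common Cold': 'Respiratory System Diseases',
--     'GERD': 'Digestive System Diseases',
--     'Chronic Cholestasis': 'Digestive System Diseases',
--     'Peptic Ulcer Disease': 'Digestive System Diseases',
--     'Alcoholic Hepatitis': 'Digestive System Diseases',
--     'Hepatitis A': 'Digestive System Diseases',
--     'Hepatitis B': 'Digestive System Diseases',
--     'Hepatitis C': 'Digestive System Diseases',
--     'Hepatitis D': 'Digestive System Diseases',
--     'Hepatitis E': 'Digestive System Diseases',
--     'Heart Attack': 'Cardiovascular Diseases',
--     'Hypertension': 'Cardiovascular Diseases',
--     'Diabetes': 'Endocrine System Diseases',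
--     'Hyperthyroidism': 'Endocrine System Diseases',
--     'Hypothyroidism': 'Endocrine System Diseases',
--     'Hypoglycemia': 'Endocrine System Diseases',
--     'Osteoarthritis': 'Musculoskeletal System Diseases',
--     'Arthritis': 'Musculoskeletal System Diseases',
--     'Cervical Spondylosis': 'Musculoskeletal System Diseases',
--     'Paralysis (Brain Hemorrhage)': 'Neurological Diseases',
--     'Migraine': 'Neurological Diseases',
--     'Vertigo (Paroxysmal Positional Vertigo)': 'Neurological Diseases',
--     'Fungal Infection': 'Infectious Diseases',
--     'AIDS': 'Infectious Diseases',
--     'Urinary Tract Infection': 'Infectious Diseases',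
--     'Malaria': 'Infectious Diseases',
--     'Chicken Pox': 'Infectious Diseases',
--     'Dengue': 'Infectious Diseases',
--     'Typhoid': 'Infectious Diseases',
--     'Acne': 'Skin Diseases',
--     'Impetigo': 'Skin Diseases',
--     'Psoriasis': 'Skin Diseases',
--     'Varicose Veins': 'Other Diseases',
--     'Allergy': 'Other Diseases',
--     'Drug Reaction': 'Other Diseases',
--     'Gastroenteritis': 'Other Diseases',
-- }
--
--
-- def categorize_diseases(data):
--     out = {}
--     for disease, symptoms in data:
--         out.setdefault(_LOOKUP.get(disease, 'Other Diseases'), []).append((disease, symptoms))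
--     return out
-- ===== Notes on version B (the rewrite author's own statement) =====
-- stated objective: simpler
-- what changed: Replaces the per-item scan over the nine category sets (with a 'categorized' flag and break) by a precomputed reverse table disease->category built once, so the loop body is a single dict lookup with 'Other Diseases' as default.
import Mathlib
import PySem

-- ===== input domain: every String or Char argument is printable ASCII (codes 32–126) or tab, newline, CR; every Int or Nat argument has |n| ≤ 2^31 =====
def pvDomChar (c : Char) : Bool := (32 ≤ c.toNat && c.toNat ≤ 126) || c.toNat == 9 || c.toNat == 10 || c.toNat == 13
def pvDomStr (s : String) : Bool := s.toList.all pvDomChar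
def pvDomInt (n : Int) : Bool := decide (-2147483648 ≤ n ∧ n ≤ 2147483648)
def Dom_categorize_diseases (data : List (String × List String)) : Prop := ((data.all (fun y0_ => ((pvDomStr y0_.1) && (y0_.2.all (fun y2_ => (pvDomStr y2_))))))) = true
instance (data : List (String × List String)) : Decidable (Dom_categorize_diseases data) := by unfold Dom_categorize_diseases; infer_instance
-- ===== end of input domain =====

-- B replaces A's per-item scan over the nine category sets (flag + break) by a single
-- precomputed reverse table disease -> category and one dict lookup per item (objective: simpler).

-- ===== PORT A =====
-- A's 'categories' dict: category -> set of diseases (each set literal has distinct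
-- elements, so the list IS the PySem.Set; only membership is taken, order-independent).
def pvCatsA : List (String × List String) :=
  [("Respiratory System Diseases", ["Bronchial Asthma", "Pneumonia", "Tuberculosis", "Common Cold"]),
   ("Digestive System Diseases", ["GERD", "Chronic Cholestasis", "Peptic Ulcer Disease", "Alcoholic Hepatitis",
      "Hepatitis A", "Hepatitis B", "Hepatitis C", "Hepatitis D", "Hepatitis E"]),
   ("Cardiovascular Diseases", ["Heart Attack", "Hypertension"]),
   ("Endocrine System Diseases", ["Diabetes", "Hyperthyroidism", "Hypothyroidism", "Hypoglycemia"]),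
   ("Musculoskeletal System Diseases", ["Osteoarthritis", "Arthritis", "Cervical Spondylosis"]),
   ("Neurological Diseases", ["Paralysis (Brain Hemorrhage)", "Migraine", "Vertigo (Paroxysmal Positional Vertigo)"]),
   ("Infectious Diseases", ["Fungal Infection", "AIDS", "Urinary Tract Infection", "Malaria", "Chicken Pox",
      "Dengue", "Typhoid"]),
   ("Skin Diseases", ["Acne", "Impetigo", "Psoriasis"]),
   ("Other Diseases", ["Varicose Veins", "Allergy", "Drug Reaction", "Gastroenteritis"])]

-- A's inner 'for category, diseases in categories.items(): if disease in diseases: …; break'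
-- with the 'categorized' flag: the first matching category, as an Option.
def pvFindCatA (dis : String) : List (String × List String) → Option String
  | [] => none
  | (c, ds) :: rest => if PySem.Set.contains ds dis then some c else pvFindCatA dis rest

-- 'setdefault(k, []).append(p)' is Dict.modify k [] (· ++ [p]).
def categorize_diseases (data : List (String × List String)) : List (String × List (String × List String)) :=
  (data.foldl (fun d p =>
      match pvFindCatA p.1 pvCatsA with
      | some c => d.modify c [] (fun l => l ++ [p])
      | none => d.modify "Other Diseases" [] (fun l => l ++ [p]))
    PySem.Dict.empty).items

-- ===== PORT B =====
-- Source B's literal reverse table _LOOKUP (distinct keys, insertion order as written).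
def pvLookupB : PySem.Dict String String := PySem.Dict.mk
  [("Bronchial Asthma", "Respiratory System Diseases"),
   ("Pneumonia", "Respiratory System Diseases"),
   ("Tuberculosis", "Respiratory System Diseases"),
   ("Common Cold", "Respiratory System Diseases"),
   ("GERD", "Digestive System Diseases"),
   ("Chronic Cholestasis", "Digestive System Diseases"),
   ("Peptic Ulcer Disease", "Digestive System Diseases"),
   ("Alcoholic Hepatitis", "Digestive System Diseases"),
   ("Hepatitis A", "Digestive System Diseases"),
   ("Hepatitis B", "Digestive System Diseases"),
   ("Hepatitis C", "Digestive System Diseases"),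
   ("Hepatitis D", "Digestive System Diseases"),
   ("Hepatitis E", "Digestive System Diseases"),
   ("Heart Attack", "Cardiovascular Diseases"),
   ("Hypertension", "Cardiovascular Diseases"),
   ("Diabetes", "Endocrine System Diseases"),
   ("Hyperthyroidism", "Endocrine System Diseases"),
   ("Hypothyroidism", "Endocrine System Diseases"),
   ("Hypoglycemia", "Endocrine System Diseases"),
   ("Osteoarthritis", "Musculoskeletal System Diseases"),
   ("Arthritis", "Musculoskeletal System Diseases"),
   ("Cervical Spondylosis", "Musculoskeletal System Diseases"),
   ("Paralysis (Brain Hemorrhage)", "Neurological Diseases"),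
   ("Migraine", "Neurological Diseases"),
   ("Vertigo (Paroxysmal Positional Vertigo)", "Neurological Diseases"),
   ("Fungal Infection", "Infectious Diseases"),
   ("AIDS", "Infectious Diseases"),
   ("Urinary Tract Infection", "Infectious Diseases"),
   ("Malaria", "Infectious Diseases"),
   ("Chicken Pox", "Infectious Diseases"),
   ("Dengue", "Infectious Diseases"),
   ("Typhoid", "Infectious Diseases"),
   ("Acne", "Skin Diseases"),
   ("Impetigo", "Skin Diseases"),
   ("Psoriasis", "Skin Diseases"),
   ("Varicose Veins", "Other Diseases"),
   ("Allergy", "Other Diseases"),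
   ("Drug Reaction", "Other Diseases"),
   ("Gastroenteritis", "Other Diseases")]

def categorize_diseases_alt (data : List (String × List String)) : List (String × List (String × List String)) :=
  (data.foldl (fun d p =>
      d.modify (pvLookupB.getD p.1 "Other Diseases") [] (fun l => l ++ [p]))
    PySem.Dict.empty).items

-- ===== PRECONDITION & SPEC =====
def Spec_categorize_diseases (data : List (String × List String)) (out : List (String × List (String × List String))) : Prop := out = categorize_diseases_alt data
instance (data : List (String × List String)) (out : List (String × List (String × List String))) : Decidable (Spec_categorize_diseases data out) := by unfold Spec_categorize_diseases; infer_instance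

-- ===== CLAIM (what is proved, stated in full; the proofs are below) =====
def Claim_equal_categorize_diseases : Prop := ∀ (data : List (String × List String)), Dom_categorize_diseases data → Spec_categorize_diseases data (categorize_diseases data)

-- ===== LEMMAS AND PROOFS =====

-- Looking up s in a dict literal whose first block maps every d ∈ ds to c is:
-- c if s ∈ ds, else the lookup in the rest.
theorem pv_get?_mk_block (ds : List String) (c s : String) (l : List (String × String)) :
    (PySem.Dict.mk ((ds.map (fun d => (d, c))) ++ l)).get? s
      = if ds.contains s then some c else (PySem.Dict.mk l).get? s := by
  induction ds with
  | nil => simp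
  | cons d ds ih =>
    simp only [List.map_cons, List.cons_append, PySem.Dict.get?_mk_cons, ih, List.contains_cons]
    by_cases h : d = s
    · simp [h]
    · have h1 : (d == s) = false := by simp [h]
      have h2 : (s == d) = false := by simp [Ne.symm h]
      simp [h1, h2]

-- A's first-match scan over a category table equals the lookup in the flattened
-- reverse dict built from the same table, for ANY table and ANY string.
theorem pv_bridge (cats : List (String × List String)) (s dflt : String) :
    (match pvFindCatA s cats with | some c => c | none => dflt)
      = (PySem.Dict.mk (cats.flatMap (fun p => p.2.map (fun d => (d, p.1))))
          : PySem.Dict String String).getD s dflt := by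
  induction cats with
  | nil => simp [pvFindCatA, PySem.Dict.getD, PySem.Dict.get?]
  | cons p rest ih =>
    obtain ⟨c, ds⟩ := p
    simp only [List.flatMap_cons]
    rw [PySem.Dict.getD_eq_get?_getD, pv_get?_mk_block]
    simp only [pvFindCatA, PySem.Set.contains_eq_listContains]
    by_cases h : s ∈ ds
    · simp [h]
    · simp only [List.contains_eq_mem, h, decide_false, Bool.false_eq_true, if_false,
        ← PySem.Dict.getD_eq_get?_getD, ih]

-- Source B's literal table IS the flattening of A's category table.
theorem pv_lookup_eq_flat :
    pvLookupB = PySem.Dict.mk (pvCatsA.flatMap (fun p => p.2.map (fun d => (d, p.1)))) := by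
  decide

-- Per item, A's chosen category equals B's.
theorem pv_step_eq (d : PySem.Dict String (List (String × List String))) (p : String × List String) :
    (match pvFindCatA p.1 pvCatsA with
     | some c => d.modify c [] (fun l => l ++ [p])
     | none => d.modify "Other Diseases" [] (fun l => l ++ [p]))
      = d.modify (pvLookupB.getD p.1 "Other Diseases") [] (fun l => l ++ [p]) := by
  rw [pv_lookup_eq_flat, ← pv_bridge]
  cases pvFindCatA p.1 pvCatsA <;> rfl

-- ===== VERDICT (by name: the statement is the Claim_ definition above) =====
theorem categorize_diseases_spec : Claim_equal_categorize_diseases := by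
  intro data _
  unfold Spec_categorize_diseases categorize_diseases categorize_diseases_alt
  have hf : (fun (d : PySem.Dict String (List (String × List String))) (p : String × List String) =>
      match pvFindCatA p.1 pvCatsA with
      | some c => d.modify c [] (fun l => l ++ [p])
      | none => d.modify "Other Diseases" [] (fun l => l ++ [p]))
      = (fun d p => d.modify (pvLookupB.getD p.1 "Other Diseases") [] (fun l => l ++ [p])) :=
    funext fun d => funext fun p => pv_step_eq d p
  rw [hf]
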